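-- pv_equiv track=rewrite | github.com/Protonk/BIDDER | experiments/acm/flow/acm_mangoldt_tomography.py | tau_table
-- ===== SOURCE A (Python) =====
-- def tau_table(mmax, j_max):
--     """τ_j(k) for 1 ≤ k ≤ mmax, 1 ≤ j ≤ j_max via Dirichlet convolution."""
--     tau = [[0] * (mmax + 1) for _ in range(j_max)]
--     for k in range(1, mmax + 1):
--         tau[0][k] = 1
--     for jx in range(1, j_max):
--         prev = tau[jx - 1]
--         cur = tau[jx]
--         for d in range(1, mmax + 1):
--             v = prev[d]
--             if v == 0:
--                 continue
--             for k in range(d, mmax + 1, d):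
--                 cur[k] += v
--     return tau
-- ===== SOURCE B (Python) =====
-- def tau_table(mmax, j_max):
--     """tau_j(k) for 1 <= k <= mmax, 1 <= j <= j_max: build the divisor lists once,
--     then obtain each row from the previous one by a direct gather over divisors."""
--     divs = [[] for _ in range(mmax + 1)]
--     for d in range(1, mmax + 1):
--         for m in range(d, mmax + 1, d):
--             divs[m].append(d)
--     row = [1 if k >= 1 else 0 for k in range(mmax + 1)]
--     table = []
--     for jx in range(j_max):
--         if jx:
--             row = [sum(row[d] for d in divs[k]) for k in range(mmax + 1)]
--         table.append(row)
--     return table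
-- ===== Notes on version B (the rewrite author's own statement) =====
-- stated objective: alternative
-- what changed: A fills each row by scattering prev[d] over all stride-d multiples anew for every row (with a zero-skip); B builds the divisor index divs[k] once by a single sieve and then computes each row by a direct gather comprehension over each k's divisor list. Pre_ excludes mmax >= 1 with j_max <= 0, where A raises IndexError (tau[0] on an empty table).
import Mathlib
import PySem

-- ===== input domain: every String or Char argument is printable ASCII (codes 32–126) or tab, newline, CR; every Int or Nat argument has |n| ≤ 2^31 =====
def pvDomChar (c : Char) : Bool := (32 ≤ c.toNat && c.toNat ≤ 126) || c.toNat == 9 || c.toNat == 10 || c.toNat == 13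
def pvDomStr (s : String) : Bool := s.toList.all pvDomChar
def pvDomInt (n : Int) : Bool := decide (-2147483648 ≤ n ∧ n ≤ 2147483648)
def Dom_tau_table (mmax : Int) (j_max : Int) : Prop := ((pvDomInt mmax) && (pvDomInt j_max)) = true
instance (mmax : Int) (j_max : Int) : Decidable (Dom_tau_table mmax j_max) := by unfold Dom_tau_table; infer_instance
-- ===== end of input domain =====

-- B replaces A's per-row scatter over arithmetic strides by a divisor index built once plus a
-- per-row gather; identical table (return value only — A mutates only lists it creates itself).

-- ===== PORT A =====
-- inner loop 'for k in range(d, mmax+1, d): cur[k] += v', guarded by 'if v == 0: continue'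
def tauInner (prev : List Int) (mmax : Int) (c : List Int) (d : Int) : List Int :=
  if PySem.List.pyGetD prev d 0 = 0 then c
  else (PySem.List.pyRange d (mmax + 1) d).foldl
    (fun c k => PySem.List.pySetD c k (PySem.List.pyGetD c k 0 + PySem.List.pyGetD prev d 0)) c

-- 'for d in range(1, mmax+1): …' filling one row
def rowA (prev : List Int) (mmax : Int) (cur : List Int) : List Int :=
  (PySem.List.pyRange 1 (mmax + 1) 1).foldl (tauInner prev mmax) cur

def tau_table (mmax : Int) (j_max : Int) : List (List Int) :=
  let tau : List (List Int) :=
    (PySem.List.pyRange 0 j_max 1).map (fun _ => PySem.List.pyRepeat [(0 : Int)] (mmax + 1))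
  let tau :=
    (PySem.List.pyRange 1 (mmax + 1) 1).foldl
      (fun t k => PySem.List.pySetD t 0 (PySem.List.pySetD (PySem.List.pyGetD t 0 []) k 1)) tau
  (PySem.List.pyRange 1 j_max 1).foldl
    (fun t jx =>
      PySem.List.pySetD t jx
        (rowA (PySem.List.pyGetD t (jx - 1) []) mmax (PySem.List.pyGetD t jx []))) tau

-- ===== PORT B =====
-- 'divs = [[] for _ in range(mmax+1)]; for d in …: for m in range(d, mmax+1, d): divs[m].append(d)'
def buildDivs (mmax : Int) : List (List Int) :=
  (PySem.List.pyRange 1 (mmax + 1) 1).foldl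
    (fun t d => (PySem.List.pyRange d (mmax + 1) d).foldl
      (fun t m => PySem.List.pySetD t m (PySem.List.pyGetD t m [] ++ [d])) t)
    ((PySem.List.pyRange 0 (mmax + 1) 1).map (fun _ => ([] : List Int)))

-- 'row = [sum(row[d] for d in divs[k]) for k in range(mmax+1)]'
def rowB (divs : List (List Int)) (mmax : Int) (row : List Int) : List Int :=
  (PySem.List.pyRange 0 (mmax + 1) 1).map
    (fun k => ((PySem.List.pyGetD divs k []).map (fun d => PySem.List.pyGetD row d 0)).sum)

-- the loop body: 'if jx: row = …; table.append(row)' on the state (table, row)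
def stepB (divs : List (List Int)) (mmax : Int) (st : List (List Int) × List Int) (jx : Int) :
    List (List Int) × List Int :=
  let row := if jx = 0 then st.2 else rowB divs mmax st.2
  (st.1 ++ [row], row)

def tau_table_alt (mmax : Int) (j_max : Int) : List (List Int) :=
  let divs := buildDivs mmax
  let row0 := (PySem.List.pyRange 0 (mmax + 1) 1).map (fun k => if 1 ≤ k then (1 : Int) else 0)
  ((PySem.List.pyRange 0 j_max 1).foldl (stepB divs mmax) ([], row0)).1

-- ===== PRECONDITION & SPEC =====
-- A raises IndexError (tau[0] on the empty table) when mmax ≥ 1 and j_max ≤ 0; excluded here.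
def Pre_tau_table (mmax : Int) (j_max : Int) : Prop := mmax ≤ 0 ∨ 1 ≤ j_max
instance (mmax : Int) (j_max : Int) : Decidable (Pre_tau_table mmax j_max) := by
  unfold Pre_tau_table; infer_instance
def pvWitness_tau_table : Int × Int := (5, 3)

def Spec_tau_table (mmax : Int) (j_max : Int) (out : List (List Int)) : Prop := out = tau_table_alt mmax j_max
instance (mmax : Int) (j_max : Int) (out : List (List Int)) : Decidable (Spec_tau_table mmax j_max out) := by unfold Spec_tau_table; infer_instance

-- ===== CLAIM (what is proved, stated in full; the proofs are below) =====
def Claim_equal_tau_table : Prop := ∀ (mmax : Int) (j_max : Int), Dom_tau_table mmax j_max → Pre_tau_table mmax j_max → Spec_tau_table mmax j_max (tau_table mmax j_max)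
-- ===== LEMMAS AND PROOFS =====

-- list equality through getD
lemma eq_of_getD {α : Type} (d : α) (l₁ l₂ : List α) (hlen : l₁.length = l₂.length)
    (h : ∀ i, i < l₁.length → l₁.getD i d = l₂.getD i d) : l₁ = l₂ := by
  apply List.ext_getElem hlen
  intro i h1 h2
  have := h i h1
  simpa [List.getD, List.getElem?_eq_getElem, h1, h2] using this

lemma pyGetD_toNat {α : Type} (t : List α) (k : Int) (d : α) (hk : 0 ≤ k) :
    PySem.List.pyGetD t k d = t.getD k.toNat d := by
  rw [show k = ((k.toNat : Nat) : Int) by omega, PySem.List.pyGetD_natCast, Int.toNat_natCast]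

lemma set_getD_self {α : Type} (t : List α) (d : α) (i : Nat) : t.set i (t.getD i d) = t := by
  by_cases h : i < t.length
  · simp [List.getD, h, List.set_getElem_self]
  · exact List.set_eq_of_length_le (by omega)

-- a fold of read-modify-writes keeps the length
lemma scatter_length {α : Type} (f : Int → α → α) (d : α) (g : List α → Int → List α)
    (l : List Int) (hg : ∀ t, ∀ k ∈ l, g t k = PySem.List.pySetD t k (f k (PySem.List.pyGetD t k d)))
    (t : List α) : (l.foldl g t).length = t.length := by
  induction l generalizing t with
  | nil => rfl
  | cons k rest ih =>
    rw [List.foldl_cons, ih (fun t' k' hk' => hg t' k' (by simp [hk'])),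
      hg t k (by simp), PySem.List.length_pySetD]

lemma nodup_pyRange_pos (a b s : Int) (hs : 0 < s) : (PySem.List.pyRange a b s).Nodup := by
  rw [PySem.List.pyRange_of_pos a b hs]
  refine List.Nodup.map ?_ (List.nodup_range)
  intro x y hxy
  have h1 : s * (x : Int) = s * y := by linarith
  have := mul_left_cancel₀ (by omega : (s : Int) ≠ 0) h1
  exact_mod_cast this

lemma mem_pyRange_bounds {d b x : Int} (hd : 0 < d) (hx : x ∈ PySem.List.pyRange d b d) :
    d ≤ x ∧ x < b := by
  have := (PySem.List.mem_pyRange_iff_of_pos hd x).mp hx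
  exact ⟨this.1, this.2.1⟩

-- master scatter lemma: folding read-modify-writes at distinct in-range indices, elementwise
lemma scatter_getD {α : Type} (f : Int → α → α) (d : α) (g : List α → Int → List α)
    (l : List Int) (hg : ∀ t, ∀ k ∈ l, g t k = PySem.List.pySetD t k (f k (PySem.List.pyGetD t k d)))
    (t : List α) (hnd : l.Nodup)
    (hb : ∀ x ∈ l, 0 ≤ x ∧ x.toNat < t.length) (i : Nat) :
    (l.foldl g t).getD i d
      = if (i : Int) ∈ l then f (i : Int) (t.getD i d) else t.getD i d := by
  induction l generalizing t with
  | nil => simp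
  | cons k rest ih =>
    obtain ⟨hk0, hklen⟩ := hb k (by simp)
    have hget : PySem.List.pyGetD t k d = t.getD k.toNat d := pyGetD_toNat t k d hk0
    have hstep : g t k = t.set k.toNat (f k (t.getD k.toNat d)) := by
      rw [hg t k (by simp), PySem.List.pySetD_of_nonneg _ _ hk0, hget]
    rw [List.foldl_cons, ih (fun t' k' hk' => hg t' k' (by simp [hk'])) _ (List.Nodup.of_cons hnd)
      (by intro x hx; have := hb x (by simp [hx]); simp only [hstep]; simpa using this)]
    by_cases hik : i = k.toNat
    · have hik' : ((i : Nat) : Int) = k := by omega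
      have hnotin : ((i : Nat) : Int) ∉ rest := by
        rw [hik']; exact (List.nodup_cons.mp hnd).1
      rw [if_neg hnotin, if_pos (by simp [hik'])]
      rw [hstep, hik', hik]
      simp [List.getD, hklen]
    · have hne : k.toNat ≠ i := fun h => hik h.symm
      have h2 : (g t k).getD i d = t.getD i d := by
        simp [hstep, List.getD, List.getElem?_set_ne hne]
      rw [h2]
      have hmem : (((i : Nat) : Int) ∈ k :: rest) ↔ (((i : Nat) : Int) ∈ rest) := by
        simp only [List.mem_cons, or_iff_right_iff_imp]
        intro h; exfalso; omega
      simp only [hmem]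

-- A's inner loop, elementwise
lemma tauInner_getD (prev : List Int) (mmax d : Int) (c : List Int) (hd : 1 ≤ d)
    (hlen : c.length = (mmax + 1).toNat) (i : Nat) :
    (tauInner prev mmax c d).getD i 0
      = if (i : Int) ∈ PySem.List.pyRange d (mmax + 1) d
        then c.getD i 0 + prev.getD d.toNat 0 else c.getD i 0 := by
  unfold tauInner
  rw [pyGetD_toNat prev d 0 (by omega)]
  by_cases hv : prev.getD d.toNat 0 = 0
  · rw [if_pos hv, hv]
    split <;> omega
  · rw [if_neg hv]
    rw [scatter_getD (fun _ x => x + prev.getD d.toNat 0) 0 _ _ (fun _ _ _ => rfl) c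
      (nodup_pyRange_pos _ _ _ (by omega))
      (by intro x hx; have := mem_pyRange_bounds (by omega) hx; omega) i]

lemma tauInner_length (prev : List Int) (mmax d : Int) (c : List Int) :
    (tauInner prev mmax c d).length = c.length := by
  unfold tauInner
  split
  · rfl
  · exact scatter_length (fun _ x => x + PySem.List.pyGetD prev d 0) 0 _ _ (fun _ _ _ => rfl) c

-- A's d-loop, elementwise: each entry accumulates prev over its hit list
lemma foldl_tauInner_getD (prev : List Int) (mmax : Int) (D : List Int)
    (hD : ∀ d ∈ D, 1 ≤ d) (cur : List Int) (hlen : cur.length = (mmax + 1).toNat) (i : Nat) :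
    (D.foldl (tauInner prev mmax) cur).getD i 0
      = cur.getD i 0
        + ((D.filter (fun d => decide ((i : Int) ∈ PySem.List.pyRange d (mmax + 1) d))).map
            (fun d => prev.getD d.toNat 0)).sum := by
  induction D generalizing cur with
  | nil => simp
  | cons d D' ih =>
    rw [List.foldl_cons, ih (fun x hx => hD x (by simp [hx])) _
      (by rw [tauInner_length]; exact hlen)]
    rw [tauInner_getD prev mmax d cur (hD d (by simp)) hlen i]
    by_cases hm : (i : Int) ∈ PySem.List.pyRange d (mmax + 1) d
    · simp only [List.filter_cons, hm, decide_true, if_true, List.map_cons, List.sum_cons]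
      ring
    · simp only [List.filter_cons, hm, decide_false, Bool.false_eq_true, if_false]

lemma foldl_tauInner_length (prev : List Int) (mmax : Int) (D : List Int) (cur : List Int) :
    (D.foldl (tauInner prev mmax) cur).length = cur.length := by
  induction D generalizing cur with
  | nil => rfl
  | cons d D' ih => rw [List.foldl_cons, ih, tauInner_length]

-- collapsing 'tau[0][k] = …' folds into one outer write
lemma foldl_rmw0 {α : Type} (d : α) (g : α → Int → α) (l : List Int) (t : List α) :
    l.foldl (fun t k => PySem.List.pySetD t 0 (g (PySem.List.pyGetD t 0 d) k)) t
      = PySem.List.pySetD t 0 (l.foldl g (PySem.List.pyGetD t 0 d)) := by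
  induction l generalizing t with
  | nil =>
    cases t with
    | nil => simp [PySem.List.pySetD_of_nonneg _ _ (le_refl (0:Int))]
    | cons r rest =>
      simp [PySem.List.pySetD_of_nonneg _ _ (le_refl (0:Int)), PySem.List.pyGetD_zero_cons]
  | cons k rest ih =>
    cases t with
    | nil =>
      simp only [List.foldl_cons]
      rw [ih]
      simp [PySem.List.pySetD_of_nonneg _ _ (le_refl (0:Int)), PySem.List.pyGetD]
    | cons r rs =>
      simp only [List.foldl_cons]
      rw [ih]
      simp [PySem.List.pySetD_of_nonneg _ _ (le_refl (0:Int)), PySem.List.pyGetD_zero_cons]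

-- the shared hit list: d in [1,size) with k hit by the stride range of d (= k's divisor list)
def dl (size : Int) (k : Nat) : List Int :=
  (PySem.List.pyRange 1 size 1).filter (fun d => decide ((k : Int) ∈ PySem.List.pyRange d size d))

-- the mathematical rows (s = mmax+1 ≥ 1)
def mrow (s : Int) : Nat → List Int
  | 0 => 0 :: List.replicate (s.toNat - 1) 1
  | j+1 => (List.range s.toNat).map (fun k => ((dl s k).map (fun d => (mrow s j).getD d.toNat 0)).sum)

lemma length_mrow (s : Int) (hs : 1 ≤ s) (j : Nat) : (mrow s j).length = s.toNat := by
  cases j with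
  | zero => simp [mrow]; omega
  | succ j => simp [mrow]

lemma mrow_zero_getD (s : Int) (i : Nat) (hi : i < s.toNat) :
    (mrow s 0).getD i 0 = if i = 0 then 0 else 1 := by
  cases i with
  | zero => simp [mrow]
  | succ i =>
    simp only [mrow, List.getD_cons_succ]
    have h2 : i < s.toNat - 1 := by omega
    simp [h2]

lemma mrow_succ_getD (s : Int) (j : Nat) (i : Nat) (hi : i < s.toNat) :
    (mrow s (j+1)).getD i 0 = ((dl s i).map (fun d => (mrow s j).getD d.toNat 0)).sum := by
  simp only [mrow]
  exact PySem.List.getD_map_range _ _ _ _ hi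

lemma mem_dl (s : Int) (k : Nat) (d : Int) (hd : d ∈ dl s k) : 1 ≤ d := by
  unfold dl at hd
  have hm := List.mem_of_mem_filter hd
  rw [PySem.List.mem_pyRange_one] at hm
  omega

-- A's row built on a zero row is the next mathematical row
lemma rowA_eq (mmax : Int) (hm : 0 ≤ mmax) (j : Nat) :
    rowA (mrow (mmax + 1) j) mmax (List.replicate (mmax + 1).toNat 0) = mrow (mmax + 1) (j+1) := by
  unfold rowA
  apply eq_of_getD 0
  · rw [foldl_tauInner_length, List.length_replicate, length_mrow _ (by omega)]
  · intro i hi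
    rw [foldl_tauInner_length, List.length_replicate] at hi
    rw [foldl_tauInner_getD _ _ _ (fun d hd => (PySem.List.mem_pyRange_one.mp hd).1) _
      (List.length_replicate) i]
    rw [mrow_succ_getD _ _ _ hi, List.getD_replicate _ hi]
    rw [zero_add]
    rfl

-- A's initialisation of row 0
lemma row0_eq (mmax : Int) (hm : 0 ≤ mmax) :
    (PySem.List.pyRange 1 (mmax + 1) 1).foldl (fun r k => PySem.List.pySetD r k 1)
      (List.replicate (mmax + 1).toNat 0) = mrow (mmax + 1) 0 := by
  apply eq_of_getD 0
  · rw [scatter_length (fun _ _ => (1:Int)) 0 _ _ (fun _ _ _ => rfl), List.length_replicate,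
      length_mrow _ (by omega)]
  · intro i hi
    rw [scatter_length (fun _ _ => (1:Int)) 0 _ _ (fun _ _ _ => rfl), List.length_replicate] at hi
    rw [scatter_getD (fun _ _ => (1:Int)) 0 _ _ (fun _ _ _ => rfl) _
      (nodup_pyRange_pos _ _ _ (by omega))
      (by intro x hx; rw [PySem.List.mem_pyRange_one] at hx; simp; omega) i]
    rw [mrow_zero_getD _ _ hi, List.getD_replicate _ hi]
    simp only [PySem.List.mem_pyRange_one]
    by_cases h0 : i = 0
    · simp [h0]
    · rw [if_pos (by omega : 1 ≤ (i:Int) ∧ (i:Int) < mmax + 1), if_neg h0]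

-- with no positive strides, A's jx-loop is the identity
lemma foldA_neg (mmax : Int) (hm : mmax < 0) (l : List Int) (h0 : ∀ x ∈ l, 0 ≤ x)
    (t : List (List Int)) :
    l.foldl (fun t jx => PySem.List.pySetD t jx
        (rowA (PySem.List.pyGetD t (jx - 1) []) mmax (PySem.List.pyGetD t jx []))) t = t := by
  induction l generalizing t with
  | nil => rfl
  | cons jx rest ih =>
    have hjx : (0:Int) ≤ jx := h0 jx (by simp)
    have hrow : rowA (PySem.List.pyGetD t (jx - 1) []) mmax (PySem.List.pyGetD t jx [])
        = PySem.List.pyGetD t jx [] := by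
      unfold rowA
      rw [PySem.List.pyRange_one_eq_nil (by omega)]
      rfl
    rw [List.foldl_cons, hrow, pyGetD_toNat t jx [] hjx,
      PySem.List.pySetD_of_nonneg _ _ hjx, set_getD_self,
      ih (fun x hx => h0 x (by simp [hx]))]

-- A's jx-loop fills the rows one by one (mmax ≥ 0, table of J ≥ 1 rows)
lemma tblA_inv (mmax : Int) (hm : 0 ≤ mmax) (J : Nat) (hJ : 1 ≤ J) (n : Nat) (hn : n ≤ J - 1) :
    (PySem.List.pyRange 1 (1 + (n : Int)) 1).foldl
      (fun t jx => PySem.List.pySetD t jx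
        (rowA (PySem.List.pyGetD t (jx - 1) []) mmax (PySem.List.pyGetD t jx [])))
      (mrow (mmax + 1) 0 :: List.replicate (J - 1) (List.replicate (mmax + 1).toNat 0))
    = (List.range (n+1)).map (mrow (mmax + 1))
      ++ List.replicate (J - 1 - n) (List.replicate (mmax + 1).toNat 0) := by
  induction n with
  | zero =>
    rw [PySem.List.pyRange_one_eq_nil (by omega)]
    simp
  | succ n ihn =>
    have hsplit : PySem.List.pyRange 1 (1 + ((n+1 : Nat) : Int)) 1
        = PySem.List.pyRange 1 (1 + (n : Int)) 1 ++ [1 + (n : Int)] := by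
      rw [show (1 + ((n+1 : Nat) : Int)) = (1 + (n : Int)) + 1 by push_cast; ring]
      exact PySem.List.pyRange_one_succ_right (by omega)
    rw [hsplit, List.foldl_append, ihn (by omega), List.foldl_cons, List.foldl_nil]
    have hlenmap : ((List.range (n+1)).map (mrow (mmax + 1))).length = n + 1 := by simp
    have hprev : PySem.List.pyGetD ((List.range (n+1)).map (mrow (mmax + 1))
        ++ List.replicate (J - 1 - n) (List.replicate (mmax + 1).toNat 0)) (1 + (n : Int) - 1) []
        = mrow (mmax + 1) n := by
      rw [pyGetD_toNat _ _ _ (by omega), show (1 + (n:Int) - 1).toNat = n by omega,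
        List.getD_append _ _ _ _ (by omega),
        PySem.List.getD_map_range _ _ _ _ (by omega)]
    have hcur : PySem.List.pyGetD ((List.range (n+1)).map (mrow (mmax + 1))
        ++ List.replicate (J - 1 - n) (List.replicate (mmax + 1).toNat 0)) (1 + (n : Int)) []
        = List.replicate (mmax + 1).toNat 0 := by
      rw [pyGetD_toNat _ _ _ (by omega), show (1 + (n:Int)).toNat = n + 1 by omega,
        List.getD_append_right _ _ _ _ (by omega), hlenmap, Nat.sub_self,
        List.getD_replicate _ (by omega)]
    rw [hprev, hcur, rowA_eq mmax hm n,
      PySem.List.pySetD_of_nonneg _ _ (by omega), show (1 + (n:Int)).toNat = n + 1 by omega]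
    rw [List.set_append_right _ _ (by omega), hlenmap, Nat.sub_self,
      show J - 1 - n = (J - 1 - (n+1)) + 1 by omega, List.replicate_succ, List.set_cons_zero]
    rw [List.range_succ (n := n+1), List.map_append]
    simp

-- ===== B-side lemmas: the divisor index and the gather rows =====

-- B's outer sieve loop, elementwise: each slot accumulates the d's whose stride hits it
lemma divsFold_getD (s : Int) (D : List Int) (hD : ∀ d ∈ D, 1 ≤ d)
    (t : List (List Int)) (hlen : t.length = s.toNat) (i : Nat) :
    (D.foldl (fun t d => (PySem.List.pyRange d s d).foldl
        (fun t m => PySem.List.pySetD t m (PySem.List.pyGetD t m [] ++ [d])) t) t).getD i []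
    = t.getD i [] ++ D.filter (fun d => decide ((i : Int) ∈ PySem.List.pyRange d s d)) := by
  induction D generalizing t with
  | nil => simp
  | cons d D' ih =>
    have hd1 := hD d (by simp)
    have hl2 : ((PySem.List.pyRange d s d).foldl
        (fun t m => PySem.List.pySetD t m (PySem.List.pyGetD t m [] ++ [d])) t).length
        = t.length :=
      scatter_length (fun _ x => x ++ [d]) [] _ _ (fun _ _ _ => rfl) t
    rw [List.foldl_cons, ih (fun x hx => hD x (by simp [hx])) _ (by rw [hl2]; exact hlen)]
    rw [scatter_getD (fun _ x => x ++ [d]) [] _ _ (fun _ _ _ => rfl) t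
      (nodup_pyRange_pos _ _ _ (by omega))
      (by intro x hx; have := mem_pyRange_bounds (by omega) hx; omega) i]
    by_cases hm : (i : Int) ∈ PySem.List.pyRange d s d
    · simp only [List.filter_cons, hm, decide_true, if_true, List.append_assoc,
        List.singleton_append]
    · simp only [List.filter_cons, hm, decide_false, Bool.false_eq_true, if_false]

lemma buildDivs_getD (mmax : Int) (hm : 0 ≤ mmax) (i : Nat) :
    (buildDivs mmax).getD i [] = dl (mmax + 1) i := by
  unfold buildDivs
  rw [divsFold_getD (mmax + 1) _ (fun d hd => (PySem.List.mem_pyRange_one.mp hd).1) _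
    (by rw [List.length_map, PySem.List.length_pyRange_one]; omega) i]
  have hinit : (List.map (fun _ => ([] : List Int)) (PySem.List.pyRange 0 (mmax + 1) 1)).getD i []
      = [] := by
    simp only [List.getD, List.getElem?_map]
    cases (PySem.List.pyRange 0 (mmax + 1) 1)[i]? <;> simp
  rw [hinit, List.nil_append]
  rfl

-- B's gather applied to a mathematical row gives the next one
lemma rowB_eq (mmax : Int) (hm : 0 ≤ mmax) (j : Nat) :
    rowB (buildDivs mmax) mmax (mrow (mmax + 1) j) = mrow (mmax + 1) (j+1) := by
  unfold rowB
  rw [PySem.List.pyRange_zero, List.map_map]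
  show _ = (List.range (mmax + 1).toNat).map _
  apply List.map_congr_left
  intro k hk
  rw [List.mem_range] at hk
  simp only [Function.comp_apply, PySem.List.pyGetD_natCast]
  rw [buildDivs_getD mmax hm k]
  congr 1
  apply List.map_congr_left
  intro d hd
  exact pyGetD_toNat _ d 0 (by have := mem_dl _ _ _ hd; omega)

-- B's first row is the mathematical row 0
lemma row0B_eq (mmax : Int) (hm : 0 ≤ mmax) :
    (PySem.List.pyRange 0 (mmax + 1) 1).map (fun k => if 1 ≤ k then (1 : Int) else 0)
      = mrow (mmax + 1) 0 := by
  rw [PySem.List.pyRange_zero, List.map_map]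
  apply eq_of_getD 0
  · rw [List.length_map, List.length_range, length_mrow _ (by omega)]
  · intro i hi
    rw [List.length_map, List.length_range] at hi
    rw [PySem.List.getD_map_range _ _ _ _ hi, mrow_zero_getD _ _ hi]
    simp only [Function.comp_apply]
    by_cases h0 : i = 0
    · simp [h0]
    · rw [if_pos (by omega : (1:Int) ≤ (i:Nat)), if_neg h0]

-- B's jx-loop fills the table row by row (mmax ≥ 0)
lemma tblB_inv (mmax : Int) (hm : 0 ≤ mmax) (n : Nat) :
    (PySem.List.pyRange 0 (1 + (n : Int)) 1).foldl (stepB (buildDivs mmax) mmax)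
      ([], mrow (mmax + 1) 0)
    = ((List.range (n+1)).map (mrow (mmax + 1)), mrow (mmax + 1) n) := by
  induction n with
  | zero =>
    rw [show (1 + ((0:Nat):Int)) = 0 + 1 by omega, PySem.List.pyRange_one_singleton]
    simp [stepB]
  | succ n ih =>
    rw [show (1 + ((n+1 : Nat) : Int)) = (1 + (n : Int)) + 1 by push_cast; ring,
      PySem.List.pyRange_one_succ_right (by omega), List.foldl_append, ih,
      List.foldl_cons, List.foldl_nil]
    simp only [stepB]
    rw [if_neg (by omega : ¬ (1 + (n:Int) = 0)), rowB_eq mmax hm n]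
    rw [List.range_succ (n := n+1), List.map_append]
    simp

-- with mmax < 0 every appended row is []
lemma tblB_nil (divs : List (List Int)) (mmax : Int) (hm : mmax < 0) (l : List Int)
    (acc : List (List Int)) :
    l.foldl (stepB divs mmax) (acc, [])
      = (acc ++ l.map (fun _ => ([] : List Int)), []) := by
  induction l generalizing acc with
  | nil => simp
  | cons x l ih =>
    have hrow : rowB divs mmax [] = [] := by
      unfold rowB
      rw [PySem.List.pyRange_one_eq_nil (by omega)]
      rfl
    rw [List.foldl_cons]
    have hstep : stepB divs mmax (acc, []) x = (acc ++ [[]], []) := by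
      simp [stepB, hrow]
    rw [hstep, ih]
    simp

-- definitional unfoldings of the two ports (zeta-reduced let-bodies)
lemma A_unfold (mmax j_max : Int) : tau_table mmax j_max =
    (PySem.List.pyRange 1 j_max 1).foldl
      (fun t jx => PySem.List.pySetD t jx
        (rowA (PySem.List.pyGetD t (jx - 1) []) mmax (PySem.List.pyGetD t jx [])))
      ((PySem.List.pyRange 1 (mmax + 1) 1).foldl
        (fun t k => PySem.List.pySetD t 0 (PySem.List.pySetD (PySem.List.pyGetD t 0 []) k 1))
        ((PySem.List.pyRange 0 j_max 1).map
          (fun _ => PySem.List.pyRepeat [(0 : Int)] (mmax + 1)))) := rfl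

lemma B_unfold (mmax j_max : Int) : tau_table_alt mmax j_max =
    ((PySem.List.pyRange 0 j_max 1).foldl (stepB (buildDivs mmax) mmax)
      ([], (PySem.List.pyRange 0 (mmax + 1) 1).map
        (fun k => if 1 ≤ k then (1 : Int) else 0))).1 := rfl

-- main case: both ports produce the j_max mathematical rows
lemma A_main (mmax j_max : Int) (hm : 0 ≤ mmax) (hj : 1 ≤ j_max) :
    tau_table mmax j_max = (List.range j_max.toNat).map (mrow (mmax + 1)) := by
  obtain ⟨n, rfl⟩ : ∃ n : Nat, j_max = 1 + (n : Int) := ⟨j_max.toNat - 1, by omega⟩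
  have hT : (1 + (n : Int)).toNat = n + 1 := by omega
  rw [A_unfold]
  simp only [PySem.List.pyRepeat_singleton]
  rw [show (PySem.List.pyRange 0 (1 + (n : Int)) 1).map
        (fun _ => List.replicate (mmax + 1).toNat (0 : Int))
      = List.replicate (n + 1) (List.replicate (mmax + 1).toNat (0 : Int)) by
    rw [List.map_const', PySem.List.length_pyRange_one]
    congr 1 <;> omega]
  rw [foldl_rmw0 ([] : List Int) (fun r k => PySem.List.pySetD r k 1)]
  rw [List.replicate_succ, PySem.List.pyGetD_zero_cons, row0_eq mmax hm,
    PySem.List.pySetD_of_nonneg _ _ (le_refl (0 : Int)),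
    show ((0 : Int)).toNat = 0 from rfl, List.set_cons_zero]
  have hinv := tblA_inv mmax hm (n + 1) (by omega) n (by omega)
  simp only [Nat.add_sub_cancel, Nat.sub_self, List.replicate_zero, List.append_nil] at hinv
  rw [hinv, hT]

lemma B_main (mmax j_max : Int) (hm : 0 ≤ mmax) (hj : 1 ≤ j_max) :
    tau_table_alt mmax j_max = (List.range j_max.toNat).map (mrow (mmax + 1)) := by
  obtain ⟨n, rfl⟩ : ∃ n : Nat, j_max = 1 + (n : Int) := ⟨j_max.toNat - 1, by omega⟩
  rw [B_unfold, row0B_eq mmax hm, tblB_inv mmax hm n,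
    show (1 + (n : Int)).toNat = n + 1 by omega]

-- ===== VERDICT (by name: the statement is the Claim_ definition above) =====
theorem tau_table_spec : Claim_equal_tau_table := by
  unfold Claim_equal_tau_table
  intro mmax j_max _ hpre
  unfold Spec_tau_table
  by_cases hj : 1 ≤ j_max
  · by_cases hm : 0 ≤ mmax
    · rw [A_main mmax j_max hm hj, B_main mmax j_max hm hj]
    · have hmn : mmax < 0 := by omega
      rw [A_unfold, B_unfold]
      rw [PySem.List.pyRange_one_eq_nil (show mmax + 1 ≤ 1 by omega), List.foldl_nil]
      rw [show (PySem.List.pyRange 0 (mmax + 1) 1).map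
            (fun k => if 1 ≤ k then (1 : Int) else 0) = [] by
        rw [PySem.List.pyRange_one_eq_nil (by omega), List.map_nil]]
      rw [tblB_nil (buildDivs mmax) mmax hmn _ [], List.nil_append]
      rw [foldA_neg mmax hmn _
        (fun x hx => by have := (PySem.List.mem_pyRange_one.mp hx).1; omega)]
      simp only [PySem.List.pyRepeat_singleton, show (mmax + 1).toNat = 0 by omega,
        List.replicate_zero]
  · have hm0 : mmax ≤ 0 := by
      rcases hpre with h | h
      · exact h
      · omega
    rw [A_unfold, B_unfold]
    rw [PySem.List.pyRange_one_eq_nil (show j_max ≤ 1 by omega),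
      PySem.List.pyRange_one_eq_nil (show j_max ≤ 0 by omega),
      PySem.List.pyRange_one_eq_nil (show mmax + 1 ≤ 1 by omega)]
    rfl
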